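-- pv_equiv track=rewrite | github.com/gudusol/algorithm | 프로그래머스/1/92334. 신고 결과 받기/신고 결과 받기.py | solution
-- ===== SOURCE A (Python) =====
-- def solution(id_list, report, k):
--     answer = []
--     stopped_id = set()
--     user_report = {}
--     reported = {}
--     for id in id_list:
--         user_report[id] = set()
--         reported[id] = set()
--
--     for report_data in report:
--         user_id, report_id = list(report_data.split(' '))
--         reported[report_id].add(user_id)
--         user_report[user_id].add(report_id)
--
--     for report_id in reported:
--         if len(reported[report_id]) >= k:
--             stopped_id.add(report_id)
--
--     for id in id_list:
--         answer.append(len(stopped_id & user_report[id]))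
--
--     return answer
-- ===== SOURCE B (Python) =====
-- def solution(id_list, report, k):
--     reported = {i: set() for i in id_list}
--     for r in report:
--         user_id, target_id = r.split(' ')
--         reported[target_id].add(user_id)
--     count = {i: 0 for i in id_list}
--     for reporters in reported.values():
--         if len(reporters) >= k:
--             for u in reporters:
--                 count[u] += 1
--     return [count[i] for i in id_list]
-- ===== Notes on version B (the rewrite author's own statement) =====
-- stated objective: alternative
-- what changed: B builds only the per-target reporter sets and pushes +1 to each reporter of every stopped target into a zero-initialized count dict, instead of A's building a second per-user dict of reported targets and intersecting it with the stopped set for every user.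
import Mathlib
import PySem

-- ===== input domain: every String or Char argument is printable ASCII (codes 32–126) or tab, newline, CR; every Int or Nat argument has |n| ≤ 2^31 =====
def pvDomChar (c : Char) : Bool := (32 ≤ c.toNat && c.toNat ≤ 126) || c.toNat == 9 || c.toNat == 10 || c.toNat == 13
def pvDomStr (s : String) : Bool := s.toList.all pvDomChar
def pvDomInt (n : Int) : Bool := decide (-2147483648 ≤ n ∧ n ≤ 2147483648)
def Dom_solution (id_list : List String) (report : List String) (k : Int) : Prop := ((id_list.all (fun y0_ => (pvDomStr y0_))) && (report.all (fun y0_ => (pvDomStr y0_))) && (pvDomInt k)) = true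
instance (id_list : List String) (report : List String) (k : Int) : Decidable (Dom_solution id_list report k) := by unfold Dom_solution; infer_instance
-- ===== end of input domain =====

-- B replaces A's second dict (targets reported per user) and the per-user set-intersection
-- pass by a push-based +1 accumulation over each stopped target's reporter set (alternative
-- decomposition, same asymptotic cost).

-- ===== PORT A =====
-- one iteration of A's report loop, user_report side: user_report[user_id].add(report_id)
def pvStepUR (d : PySem.Dict String (PySem.Set String)) (r : String) : PySem.Dict String (PySem.Set String) :=
  match PySem.Str.split? r " " with
  | some [user_id, report_id] => d.modify user_id [] (fun s => PySem.Set.add s report_id)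
  | _ => d

-- one iteration of A's report loop, reported side: reported[report_id].add(user_id)
def pvStepRep (d : PySem.Dict String (PySem.Set String)) (r : String) : PySem.Dict String (PySem.Set String) :=
  match PySem.Str.split? r " " with
  | some [user_id, report_id] => d.modify report_id [] (fun s => PySem.Set.add s user_id)
  | _ => d

def solution (id_list : List String) (report : List String) (k : Int) : List Int :=
  -- for id in id_list: user_report[id] = set(); reported[id] = set()
  let dicts0 := id_list.foldl
    (fun (p : PySem.Dict String (PySem.Set String) × PySem.Dict String (PySem.Set String)) id =>
      (p.1.insert id ([] : PySem.Set String), p.2.insert id ([] : PySem.Set String)))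
    (PySem.Dict.empty, PySem.Dict.empty)
  -- for report_data in report: …
  let dicts := report.foldl (fun p r => (pvStepUR p.1 r, pvStepRep p.2 r)) dicts0
  let user_report := dicts.1
  let reported := dicts.2
  -- for report_id in reported: if len(reported[report_id]) >= k: stopped_id.add(report_id)
  let stopped_id := reported.keys.foldl
    (fun st report_id =>
      if k ≤ ((reported.getD report_id []).length : Int) then PySem.Set.add st report_id else st)
    ([] : PySem.Set String)
  -- for id in id_list: answer.append(len(stopped_id & user_report[id]))
  id_list.foldl
    (fun answer id => answer ++ [((PySem.Set.inter stopped_id (user_report.getD id [])).length : Int)])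
    []

-- ===== PORT B =====
-- one iteration of B's report loop: reported[target_id].add(user_id)
def pvAddReport (d : PySem.Dict String (PySem.Set String)) (r : String) : PySem.Dict String (PySem.Set String) :=
  match PySem.Str.split? r " " with
  | some [user_id, target_id] => d.modify target_id [] (fun s => PySem.Set.add s user_id)
  | _ => d

def solution_alt (id_list : List String) (report : List String) (k : Int) : List Int :=
  -- reported = {i: set() for i in id_list}; for r in report: …
  let reported := report.foldl pvAddReport
    (id_list.foldl (fun d i => d.insert i ([] : PySem.Set String)) PySem.Dict.empty)
  -- count = {i: 0 for i in id_list}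
  let count0 := id_list.foldl (fun d i => d.insert i (0 : Int)) PySem.Dict.empty
  -- for reporters in reported.values(): if len(reporters) >= k: for u in reporters: count[u] += 1
  let count := reported.values.foldl
    (fun d reporters =>
      if k ≤ (reporters.length : Int) then
        reporters.foldl (fun d u => d.modify u 0 (· + 1)) d
      else d)
    count0
  -- return [count[i] for i in id_list]
  id_list.map (fun i => count.getD i 0)

-- ===== PRECONDITION & SPEC =====
-- Pre_ excludes exactly the inputs where the Python A raises: a report string that does not
-- split on ' ' into exactly two parts (ValueError on unpacking) or mentions an id that is not
-- in id_list (KeyError).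
def Pre_solution (id_list : List String) (report : List String) (k : Int) : Prop :=
  ∀ r ∈ report, ((PySem.Str.split? r " ").getD []).length = 2 ∧
    ∀ x ∈ (PySem.Str.split? r " ").getD [], x ∈ id_list
instance (id_list : List String) (report : List String) (k : Int) : Decidable (Pre_solution id_list report k) := by unfold Pre_solution; infer_instance

def pvWitness_solution : List String × List String × Int := (["muzi", "frodo"], ["muzi frodo", "frodo muzi"], 1)

def Spec_solution (id_list : List String) (report : List String) (k : Int) (out : List Int) : Prop := out = solution_alt id_list report k
instance (id_list : List String) (report : List String) (k : Int) (out : List Int) : Decidable (Spec_solution id_list report k out) := by unfold Spec_solution; infer_instance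

-- ===== CLAIM (what is proved, stated in full; the proofs are below) =====
def Claim_equal_solution : Prop := ∀ (id_list : List String) (report : List String) (k : Int), Dom_solution id_list report k → Pre_solution id_list report k → Spec_solution id_list report k (solution id_list report k)

-- ===== LEMMAS AND PROOFS =====

-- the shared zero-initialisation dict: every lookup with the same default gives that default
theorem getD_foldl_insert_const {ν : Type} (l : List String) (d : PySem.Dict String ν) (v : ν)
    (x : String) (h : d.getD x v = v) :
    (l.foldl (fun d i => d.insert i v) d).getD x v = v := by
  induction l generalizing d with
  | nil => exact h
  | cons i t ih =>
    simp only [List.foldl_cons]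
    exact ih _ (by rw [PySem.Dict.getD_insert]; split <;> simp [h])

theorem keys_nodup_stepRep (d : PySem.Dict String (PySem.Set String)) (r : String)
    (h : d.keys.Nodup) : (pvStepRep d r).keys.Nodup := by
  unfold pvStepRep
  rcases PySem.Str.split? r " " with _ | ⟨_ | ⟨u, _ | ⟨t, _ | _⟩⟩⟩ <;> try exact h
  dsimp only
  rw [PySem.Dict.keys_modify]
  by_cases hc : d.contains t = true
  · rwa [PySem.Dict.keys_insert_of_contains _ _ hc]
  · rw [PySem.Dict.keys_insert_of_not_contains _ _ (by simpa using hc)]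
    have hnm : t ∉ d.keys := by
      rw [← PySem.Dict.contains_iff_mem_keys]
      simpa using hc
    simp only [List.nodup_append]
    refine ⟨h, by simp, ?_⟩
    intro a ha b hb
    rw [List.mem_singleton] at hb
    subst hb
    exact fun hab => hnm (hab ▸ ha)

theorem keys_nodup_repFold (l : List String) (d : PySem.Dict String (PySem.Set String))
    (h : d.keys.Nodup) : (l.foldl pvStepRep d).keys.Nodup := by
  induction l generalizing d with
  | nil => exact h
  | cons r rest ih => exact ih _ (keys_nodup_stepRep _ _ h)

theorem values_nodup_stepRep (d : PySem.Dict String (PySem.Set String)) (r : String)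
    (h : ∀ p ∈ d.items, List.Nodup p.2) : ∀ p ∈ (pvStepRep d r).items, List.Nodup p.2 := by
  unfold pvStepRep
  rcases PySem.Str.split? r " " with _ | ⟨_ | ⟨u, _ | ⟨t, _ | _⟩⟩⟩ <;> try exact h
  dsimp only
  intro p hp
  have hmi : d.modify t [] (fun s => PySem.Set.add s u) = d.insert t (PySem.Set.add (d.getD t []) u) := rfl
  rw [hmi, PySem.Dict.mem_items_insert] at hp
  rcases hp with hp | ⟨hp, _⟩
  · subst hp
    refine PySem.Set.nodup_add _ _ ?_
    rcases ho : d.get? t with _ | v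
    · simp [PySem.Dict.getD_of_get?_eq_none _ _ ho]
    · rw [PySem.Dict.getD_of_get?_eq_some _ _ ho]
      exact h (t, v) (PySem.Dict.mem_items_of_get?_eq_some _ ho)
  · exact h p hp

theorem values_nodup_repFold (l : List String) (d : PySem.Dict String (PySem.Set String))
    (h : ∀ p ∈ d.items, List.Nodup p.2) : ∀ p ∈ (l.foldl pvStepRep d).items, List.Nodup p.2 := by
  induction l generalizing d with
  | nil => exact h
  | cons r rest ih => exact ih _ (values_nodup_stepRep _ _ h)

theorem values_nodup_initFold (l : List String) (d : PySem.Dict String (PySem.Set String))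
    (h : ∀ p ∈ d.items, List.Nodup p.2) :
    ∀ p ∈ (l.foldl (fun d i => d.insert i ([] : PySem.Set String)) d).items, List.Nodup p.2 := by
  induction l generalizing d with
  | nil => exact h
  | cons i t ih =>
    refine ih _ ?_
    intro p hp
    rw [PySem.Dict.mem_items_insert] at hp
    rcases hp with hp | ⟨hp, _⟩
    · subst hp; simp
    · exact h p hp

-- the key correspondence: t was reported by u  ↔  u is a reporter of t
theorem corr_stepwise (l : List String) (d1 d2 : PySem.Dict String (PySem.Set String))
    (h : ∀ u t : String, t ∈ d1.getD u [] ↔ u ∈ d2.getD t []) :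
    ∀ u t : String, t ∈ (l.foldl pvStepUR d1).getD u [] ↔ u ∈ (l.foldl pvStepRep d2).getD t [] := by
  induction l generalizing d1 d2 with
  | nil => exact h
  | cons r rest ih =>
    simp only [List.foldl_cons]
    refine ih _ _ ?_
    intro u t
    unfold pvStepUR pvStepRep
    rcases PySem.Str.split? r " " with _ | ⟨_ | ⟨a, _ | ⟨b, _ | _⟩⟩⟩ <;> try exact h u t
    dsimp only
    rw [PySem.Dict.getD_modify, PySem.Dict.getD_modify]
    by_cases hu : u = a <;> by_cases ht : t = b <;>
      simp [hu, ht, PySem.Set.mem_add, h u t, h a b, h u b, h a t]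

-- the stopped-set loop over distinct keys is a filter
theorem stopped_eq_filter (P : String × PySem.Set String → Prop) [DecidablePred P]
    (l : List (String × PySem.Set String)) (s : PySem.Set String)
    (hdis : ∀ x ∈ s, x ∉ l.map Prod.fst) (hnd : (l.map Prod.fst).Nodup) :
    l.foldl (fun st p => if P p then PySem.Set.add st p.1 else st) s
      = s ++ (l.filter (fun p => decide (P p))).map Prod.fst := by
  induction l generalizing s with
  | nil => simp
  | cons p rest ih =>
    simp only [List.map_cons, List.nodup_cons] at hnd
    simp only [List.foldl_cons, List.filter_cons]
    by_cases hP : P p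
    · rw [if_pos hP, PySem.Set.add_of_not_mem (fun hc => hdis _ hc (by simp)),
        ih _ ?_ hnd.2]
      · simp [hP]
      · intro x hx
        rcases List.mem_append.1 hx with hx | hx
        · exact fun hc => hdis x hx (by simp [hc])
        · simp at hx; subst hx; exact hnd.1
    · rw [if_neg hP, ih _ ?_ hnd.2]
      · simp [hP]
      · intro x hx hc
        exact hdis x hx (by simp [hc])

-- the push loop of B, summed out
theorem countFold (k : Int) (l : List (String × PySem.Set String)) (d : PySem.Dict String Int)
    (id : String) :
    (l.foldl (fun d p => if k ≤ (p.2.length : Int) then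
        p.2.foldl (fun d u => d.modify u 0 (· + 1)) d else d) d).getD id 0
      = d.getD id 0
        + (l.map (fun p => if k ≤ (p.2.length : Int) then (p.2.count id : Int) else 0)).sum := by
  induction l generalizing d with
  | nil => simp
  | cons p rest ih =>
    simp only [List.foldl_cons, List.map_cons, List.sum_cons]
    by_cases hP : k ≤ (p.2.length : Int)
    · rw [if_pos hP, ih, PySem.Dict.getD_foldl_modify_add_one, if_pos hP]
      ring
    · rw [if_neg hP, ih, if_neg hP]
      ring

-- ===== VERDICT (by name: the statement is the Claim_ definition above) =====
theorem solution_spec : Claim_equal_solution := by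
  intro id_list report k _ _
  unfold Spec_solution solution solution_alt
  dsimp only
  have h1 :
      (List.foldl (fun (p : PySem.Dict String (PySem.Set String) × PySem.Dict String (PySem.Set String)) id =>
        (p.1.insert id ([] : PySem.Set String), p.2.insert id ([] : PySem.Set String)))
        (PySem.Dict.empty, PySem.Dict.empty) id_list)
      = (id_list.foldl (fun d i => d.insert i ([] : PySem.Set String)) PySem.Dict.empty,
         id_list.foldl (fun d i => d.insert i ([] : PySem.Set String)) PySem.Dict.empty) :=
    PySem.List.foldl_prod_mk
      (fun (d : PySem.Dict String (PySem.Set String)) (i : String) => d.insert i ([] : PySem.Set String))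
      (fun (d : PySem.Dict String (PySem.Set String)) (i : String) => d.insert i ([] : PySem.Set String)) id_list _ _
  rw [h1]
  have h2 := PySem.List.foldl_prod_mk pvStepUR pvStepRep report
    (id_list.foldl (fun d i => d.insert i ([] : PySem.Set String)) PySem.Dict.empty)
    (id_list.foldl (fun d i => d.insert i ([] : PySem.Set String)) PySem.Dict.empty)
  rw [h2]
  have hAB : pvAddReport = pvStepRep := rfl
  rw [hAB]
  dsimp only
  set dinit := id_list.foldl (fun d i => d.insert i ([] : PySem.Set String)) PySem.Dict.empty with hdinit
  set UR := report.foldl pvStepUR dinit with hUR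
  set Rep := report.foldl pvStepRep dinit with hRep
  -- basic facts
  have hinit : ∀ x : String, dinit.getD x [] = [] := fun x =>
    getD_foldl_insert_const id_list PySem.Dict.empty [] x (by simp [pysem])
  have hdnd : dinit.keys.Nodup :=
    PySem.Dict.nodup_keys_foldl_insert id_list (fun _ _ => ([] : PySem.Set String)) _
      PySem.Dict.nodup_keys_empty
  have hdvnd : ∀ p ∈ dinit.items, List.Nodup p.2 :=
    values_nodup_initFold id_list PySem.Dict.empty (by intro p hp; simp [PySem.Dict.empty] at hp)
  have hknd : Rep.keys.Nodup := keys_nodup_repFold report dinit hdnd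
  have hvnd : ∀ p ∈ Rep.items, List.Nodup p.2 := values_nodup_repFold report dinit hdvnd
  have hcorr : ∀ u t : String, t ∈ UR.getD u [] ↔ u ∈ Rep.getD t [] :=
    corr_stepwise report dinit dinit (fun u t => by simp [hinit])
  -- rewrite A's answer loop
  rw [PySem.List.foldl_append_singleton_eq_map
        (f := fun id => ((PySem.Set.inter
          (Rep.keys.foldl (fun st t => if k ≤ ((Rep.getD t []).length : Int) then PySem.Set.add st t else st) [])
          (UR.getD id [])).length : Int)), List.nil_append]
  -- A's stopped set is a filter over the items
  have hkeys : Rep.keys = Rep.items.map Prod.fst := rfl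
  have hcong := PySem.List.foldl_congr_mem Rep.items
    (fun (st : PySem.Set String) (p : String × PySem.Set String) =>
      if k ≤ ((Rep.getD p.1 []).length : Int) then PySem.Set.add st p.1 else st)
    (fun (st : PySem.Set String) (p : String × PySem.Set String) =>
      if k ≤ ((p.2 : PySem.Set String).length : Int) then PySem.Set.add st p.1 else st)
    ([] : PySem.Set String)
    (by
      intro acc p hp
      obtain ⟨a, b⟩ := p
      dsimp only
      rw [PySem.Dict.getD_of_mem_items Rep hp hknd])
  have hstop : (Rep.keys.foldl (fun st t => if k ≤ ((Rep.getD t []).length : Int) then PySem.Set.add st t else st) ([] : PySem.Set String))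
      = (Rep.items.filter (fun p => decide (k ≤ (p.2.length : Int)))).map Prod.fst := by
    rw [hkeys, List.foldl_map, hcong,
      stopped_eq_filter (fun p => k ≤ ((p.2 : PySem.Set String).length : Int)) Rep.items [] (by simp)
        (by rw [← hkeys]; exact hknd)]
    simp
  rw [hstop]
  -- rewrite B's values loop
  have hvals : Rep.values = Rep.items.map Prod.snd := rfl
  rw [hvals, List.foldl_map]
  apply List.map_congr_left
  intro id _
  -- B side: sum out the push loop, then turn it into a countP
  rw [countFold k Rep.items _ id,
      getD_foldl_insert_const id_list PySem.Dict.empty 0 id (by simp [pysem])]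
  have hsum : (Rep.items.map (fun p => if k ≤ (p.2.length : Int) then (p.2.count id : Int) else 0)).sum
      = ((Rep.items.countP (fun p => decide (k ≤ (p.2.length : Int)) && decide (id ∈ p.2))) : Int) := by
    have hcp := PySem.List.sum_map_ite_one_zero
      (fun p : String × PySem.Set String => decide (k ≤ ((p.2 : PySem.Set String).length : Int)) && decide (id ∈ p.2))
      Rep.items
    rw [← hcp]
    apply congrArg
    apply List.map_congr_left
    intro p hp
    by_cases h1 : k ≤ (p.2.length : Int)
    · by_cases h2 : id ∈ p.2
      · simp [h1, h2, List.count_eq_one_of_mem (hvnd p hp) h2]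
      · simp [h1, h2, List.count_eq_zero_of_not_mem h2]
    · simp [h1]
  rw [hsum]
  -- A side: length of the intersection is the same countP
  have hi : PySem.Set.inter
      ((Rep.items.filter (fun p => decide (k ≤ (p.2.length : Int)))).map Prod.fst)
      (UR.getD id [])
      = ((Rep.items.filter (fun p => decide (k ≤ (p.2.length : Int)))).map Prod.fst).filter
          (fun x => PySem.Set.contains (UR.getD id []) x) := rfl
  rw [hi, ← List.countP_eq_length_filter, List.countP_map, List.countP_filter, zero_add]
  apply congrArg
  apply List.countP_congr
  intro p hp
  obtain ⟨a, b⟩ := p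
  have hmem : Rep.getD a [] = b :=
    PySem.Dict.getD_of_mem_items Rep hp hknd []
  have hiff := hcorr id a
  rw [hmem] at hiff
  simp only [Function.comp, PySem.Set.contains_eq_listContains, Bool.and_comm]
  simp [hiff, and_comm]
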